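-- pv_equiv track=rewrite | github.com/wonju-dev/codingTestStudy | 2차/2-2.py | solution
-- ===== SOURCE A (Python) =====
-- def solution(topping):
--     frontIndex = 0
--     backIndex = 0
--     for i in range(len(topping)):
--         front = topping[:i]
--         back = topping[i:]
--         if len(set(front)) == len(set(back)):
--             frontIndex = i
--             break
--
--     for i in range(len(topping), -1, -1):
--             front = topping[:i]
--             back = topping[i:]
--             if len(set(front)) == len(set(back)):
--                 backIndex = i
--                 break
--
--     if backIndex == 0 and frontIndex == 0:
--         return 0
--     else:
--         return backIndex - frontIndex + 1
-- ===== SOURCE B (Python) =====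
-- def solution(topping):
--     n = len(topping)
--     # prefix distinct counts: pre[i] = number of distinct toppings in topping[:i]
--     pre = [0]
--     seen = set()
--     for x in topping:
--         seen.add(x)
--         pre.append(len(seen))
--     # suffix distinct counts: suf[i] = number of distinct toppings in topping[i:]
--     sufrev = [0]
--     seen = set()
--     for x in reversed(topping):
--         seen.add(x)
--         sufrev.append(len(seen))
--     suf = sufrev[::-1]
--     # a split with both sides non-empty can only balance at 1..n-1
--     eq = [i for i in range(1, n) if pre[i] == suf[i]]
--     if not eq:
--         return 0
--     return eq[-1] - eq[0] + 1
-- ===== Notes on version B (the rewrite author's own statement) =====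
-- stated objective: faster
-- what changed: Instead of rebuilding set(topping[:i]) and set(topping[i:]) from scratch at every split (quadratic), B computes prefix and suffix distinct counts in two linear passes with a running set and then scans the count arrays once for the first and last balanced split.
import Mathlib
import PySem

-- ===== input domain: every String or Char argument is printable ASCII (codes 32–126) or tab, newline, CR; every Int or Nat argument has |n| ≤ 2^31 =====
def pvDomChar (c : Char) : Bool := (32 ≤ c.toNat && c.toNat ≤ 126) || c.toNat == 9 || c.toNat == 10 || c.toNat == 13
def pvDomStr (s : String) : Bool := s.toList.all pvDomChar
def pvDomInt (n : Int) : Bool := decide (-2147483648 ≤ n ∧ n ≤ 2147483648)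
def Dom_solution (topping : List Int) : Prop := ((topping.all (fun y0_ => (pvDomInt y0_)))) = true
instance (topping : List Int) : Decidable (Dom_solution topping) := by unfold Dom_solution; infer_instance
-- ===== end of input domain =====

-- B replaces A's per-split set rebuilding by two linear prefix/suffix distinct-count passes (objective: faster).

-- ===== PORT A =====
-- len(set(topping[:i])) == len(set(topping[i:]))
def condA (topping : List Int) (i : Int) : Bool :=
  (PySem.Set.ofList (PySem.List.slice topping none (some i))).length
    == (PySem.Set.ofList (PySem.List.slice topping (some i) none)).length

-- 'for i in range(...): ... if cond: idx = i; break'  (idx stays 0 if no break)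
def firstMatchA (topping : List Int) : List Int → Int
  | [] => 0
  | i :: rest => if condA topping i then i else firstMatchA topping rest

def solution (topping : List Int) : Int :=
  let frontIndex := firstMatchA topping (PySem.List.pyRange 0 (topping.length : Int) 1)
  let backIndex := firstMatchA topping (PySem.List.pyRange (topping.length : Int) (-1) (-1))
  if backIndex = 0 ∧ frontIndex = 0 then 0 else backIndex - frontIndex + 1

-- ===== PORT B =====
-- 'for x in l: seen.add(x); out.append(len(seen))'
def countsFrom (seen : PySem.Set Int) : List Int → List Int
  | [] => []
  | x :: xs =>
      let s := PySem.Set.add seen x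
      (s.length : Int) :: countsFrom s xs

def solution_alt (topping : List Int) : Int :=
  let n : Int := topping.length
  let pre := (0 : Int) :: countsFrom PySem.Set.empty topping
  let suf := ((0 : Int) :: countsFrom PySem.Set.empty topping.reverse).reverse
  let eq := (PySem.List.pyRange 1 n 1).filter
      (fun i => PySem.List.pyGetD pre i 0 == PySem.List.pyGetD suf i 0)
  if eq = [] then 0
  else PySem.List.pyGetD eq (-1) 0 - PySem.List.pyGetD eq 0 0 + 1


-- ===== PRECONDITION & SPEC =====
def Spec_solution (topping : List Int) (out : Int) : Prop := out = solution_alt topping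
instance (topping : List Int) (out : Int) : Decidable (Spec_solution topping out) := by unfold Spec_solution; infer_instance

-- ===== CLAIM (what is proved, stated in full; the proofs are below) =====
def Claim_equal_solution : Prop := ∀ (topping : List Int), Dom_solution topping → Spec_solution topping (solution topping)

-- ===== LEMMAS AND PROOFS =====

-- distinct count of a list, the common value both ports compute
def dc (l : List Int) : Nat := l.toFinset.card

def Q (t : List Int) (k : Nat) : Bool := dc (t.take k) == dc (t.drop k)

lemma ofList_length (l : List Int) : (PySem.Set.ofList l).length = dc l := by
  have h1 : (PySem.Set.ofList l).toFinset = l.toFinset := by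
    ext x; simp [List.mem_toFinset, PySem.Set.mem_ofList]
  have h2 := List.toFinset_card_of_nodup (PySem.Set.nodup_ofList (xs := l))
  unfold dc; rw [← h1, h2]

lemma condA_natCast (t : List Int) (k : Nat) : condA t (k : Int) = Q t k := by
  unfold condA Q
  rw [PySem.List.slice_to_natCast, PySem.List.slice_from_natCast, ofList_length, ofList_length]

lemma firstMatchA_eq (t : List Int) (L : List Int) :
    firstMatchA t L = (L.filter (condA t)).headD 0 := by
  induction L with
  | nil => rfl
  | cons i rest ih =>
      simp only [firstMatchA, List.filter]
      cases h : condA t i <;> simp [ih]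

lemma pyGetD_neg_one (l : List Int) (d : Int) (h : l ≠ []) :
    PySem.List.pyGetD l (-1) d = l.getLastD d := by
  have hl : 1 ≤ l.length := by cases l <;> simp_all
  simp [PySem.List.pyGetD, PySem.List.pyGet?, PySem.List.pyIdx?, hl,
        List.getLast?_eq_getElem?, List.getLastD_eq_getLast?]

lemma pyGetD_zero (l : List Int) (d : Int) : PySem.List.pyGetD l 0 d = l.headD d := by
  cases l <;> simp [PySem.List.pyGetD, PySem.List.pyGet?, PySem.List.pyIdx?]

lemma Q_zero (t : List Int) (h : t ≠ []) : Q t 0 = false := by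
  unfold Q dc
  cases t with
  | nil => simp_all
  | cons x xs =>
      have hpos : 0 < (insert x xs.toFinset).card := Finset.card_pos.mpr ⟨x, by simp⟩
      simp; omega

lemma Q_len (t : List Int) (h : t ≠ []) : Q t t.length = false := by
  unfold Q dc
  cases t with
  | nil => simp_all
  | cons x xs => simp

-- the common filtered index list
def F (t : List Int) : List Nat := (List.range (t.length + 1)).filter (Q t)

-- ascending filter over range n equals F (t ≠ [])
lemma filter_range_eq_F (t : List Int) (h : t ≠ []) :
    (List.range t.length).filter (Q t) = F t := by
  unfold F
  rw [List.range_succ, List.filter_append]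
  simp [Q_len t h]

lemma front_filter (t : List Int) (h : t ≠ []) :
    (PySem.List.pyRange 0 (t.length : Int) 1).filter (condA t)
      = (F t).map (fun k : Nat => (k : Int)) := by
  rw [PySem.List.pyRange_one]
  have h0 : ((t.length : Int) - 0).toNat = t.length := by omega
  rw [h0]
  simp only [zero_add]
  rw [List.filter_map, ← filter_range_eq_F t h]
  congr 1
  apply List.filter_congr; intro k _; simp [Function.comp, condA_natCast]

lemma back_filter (t : List Int) :
    (PySem.List.pyRange (t.length : Int) (-1) (-1)).filter (condA t)
      = ((F t).map (fun k : Nat => (k : Int))).reverse := by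
  have h := PySem.List.pyRange_neg_one_eq_reverse (t.length : Int) (-1)
  simp only [neg_add_cancel] at h
  rw [h, List.filter_reverse]
  congr 1
  unfold F
  rw [PySem.List.pyRange_one]
  have : ((t.length : Int) + 1 - 0).toNat = t.length + 1 := by omega
  rw [this]
  simp only [zero_add]
  rw [List.filter_map]
  congr 1
  apply List.filter_congr; intro k _; simp [Function.comp, condA_natCast]

lemma countsFrom_length (seen : PySem.Set Int) (l : List Int) :
    (countsFrom seen l).length = l.length := by
  induction l generalizing seen with
  | nil => rfl
  | cons x xs ih => simp [countsFrom, ih]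

lemma countsFrom_getElem? (l : List Int) (seen : PySem.Set Int) (k : Nat) (hk : k < l.length) :
    (countsFrom seen l)[k]? = some ((PySem.Set.update seen (l.take (k+1))).length : Int) := by
  induction l generalizing seen k with
  | nil => simp at hk
  | cons x xs ih =>
      cases k with
      | zero =>
          simp [countsFrom, PySem.Set.update_cons, PySem.Set.update_nil]
      | succ k =>
          have hk' : k < xs.length := by simpa using hk
          simp only [countsFrom, List.getElem?_cons_succ, ih _ _ hk',
            List.take_succ_cons, PySem.Set.update_cons]

-- pre[k]? for 1 ≤ k ≤ n
lemma pre_getElem? (t : List Int) (k : Nat) (h1 : 1 ≤ k) (h2 : k ≤ t.length) :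
    ((0 : Int) :: countsFrom PySem.Set.empty t)[k]? = some ((dc (t.take k) : Nat) : Int) := by
  obtain ⟨j, rfl⟩ : ∃ j, k = j + 1 := ⟨k - 1, by omega⟩
  have hj : j < t.length := by omega
  rw [List.getElem?_cons_succ, countsFrom_getElem? t _ j hj,
    PySem.Set.update_empty, ofList_length]

lemma suf_getElem? (t : List Int) (k : Nat) (h2 : k < t.length) :
    (((0 : Int) :: countsFrom PySem.Set.empty t.reverse).reverse)[k]? = some ((dc (t.drop k) : Nat) : Int) := by
  have hlen : ((0 : Int) :: countsFrom PySem.Set.empty t.reverse).length = t.length + 1 := by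
    simp [countsFrom_length]
  rw [List.getElem?_reverse (by omega), hlen]
  have harith : t.length + 1 - 1 - k = (t.length - k - 1) + 1 := by omega
  rw [harith, List.getElem?_cons_succ,
    countsFrom_getElem? t.reverse _ _ (by simp; omega)]
  have htk : t.length - k - 1 + 1 = t.length - k := by omega
  rw [htk]
  congr 2
  rw [List.take_reverse]
  have : t.length - (t.length - k) = k := by omega
  rw [this, PySem.Set.update_empty, ofList_length]
  unfold dc
  rw [List.toFinset_reverse]

lemma headD_reverse (l : List Int) (d : Int) : l.reverse.headD d = l.getLastD d := by
  have h : l.reverse.head? = l.getLast? := List.head?_reverse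
  simp [List.getLastD_eq_getLast?, h]

lemma F_decomp (t : List Int) (h : t ≠ []) :
    F t = ((List.range (t.length - 1)).filter (fun k => Q t (k+1))).map Nat.succ := by
  have hn : 1 ≤ t.length := by cases t <;> simp_all
  unfold F
  rw [List.range_succ, List.filter_append]
  simp only [Q_len t h, List.filter_cons, List.filter_nil]
  have h1 : t.length = (t.length - 1) + 1 := by omega
  rw [h1, List.range_succ_eq_map]
  simp [Q_zero t h, List.filter_map]
  rfl

lemma eq_filter (t : List Int) (h : t ≠ []) :
    (PySem.List.pyRange 1 (t.length : Int) 1).filter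
        (fun i => PySem.List.pyGetD ((0 : Int) :: countsFrom PySem.Set.empty t) i 0
          == PySem.List.pyGetD (((0 : Int) :: countsFrom PySem.Set.empty t.reverse).reverse) i 0)
      = (F t).map (fun k : Nat => (k : Int)) := by
  rw [PySem.List.pyRange_one]
  have h0 : ((t.length : Int) - 1).toNat = t.length - 1 := by omega
  rw [h0, List.filter_map, F_decomp t h, List.map_map]
  have hmap : ((fun k : Nat => (k : Int)) ∘ Nat.succ) = (fun k : Nat => (1 : Int) + (k : Int)) := by
    funext k; simp [Nat.succ_eq_add_one]; ring
  rw [hmap]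
  congr 1
  apply List.filter_congr
  intro k hk
  have hk' : k < t.length - 1 := List.mem_range.mp hk
  have hcast : (1 : Int) + (k : Int) = ((k + 1 : Nat) : Int) := by push_cast; ring
  simp only [Function.comp, hcast, PySem.List.pyGetD_natCast, List.getD_eq_getElem?_getD]
  rw [pre_getElem? t (k+1) (by omega) (by omega), suf_getElem? t (k+1) (by omega)]
  unfold Q
  simp

lemma main_eq (t : List Int) : solution t = solution_alt t := by
  by_cases ht : t = []
  · subst ht; decide
  · simp only [solution, solution_alt]
    rw [firstMatchA_eq, firstMatchA_eq, front_filter t ht, back_filter t,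
      eq_filter t ht]
    cases hF : F t with
    | nil => simp
    | cons a fs =>
        have haQ : Q t a = true := by
          have : a ∈ F t := by rw [hF]; exact List.mem_cons_self
          exact (List.mem_filter.mp (by unfold F at this; exact this)).2
        have ha0 : a ≠ 0 := by
          intro h0; rw [h0, Q_zero t ht] at haQ; exact Bool.false_ne_true haQ
        have hfront : (((a :: fs).map (fun k : Nat => (k : Int))).headD 0) = (a : Int) := by simp
        have hne : ((a :: fs).map (fun k : Nat => (k : Int))) ≠ [] := by simp
        rw [headD_reverse, pyGetD_neg_one _ _ hne, pyGetD_zero]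
        rw [hfront]
        have hcond : ¬ (((a :: fs).map (fun k : Nat => (k : Int))).getLastD 0 = 0 ∧ (a : Int) = 0) := by
          intro ⟨_, h2⟩; exact ha0 (by exact_mod_cast h2)
        rw [if_neg hcond, if_neg hne]

-- ===== VERDICT (by name: the statement is the Claim_ definition above) =====
theorem solution_spec : Claim_equal_solution := by
  intro topping _
  unfold Spec_solution
  exact main_eq topping
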